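-- pv_equiv track=rewrite | github.com/nwatchcanada/nwapp-back | nwapp/shared_foundation/utils/number.py | get_special_range
-- ===== SOURCE A (Python) =====
-- STREET_NUMBER_RANGE_TYPE_ALL = 1
--
-- STREET_NUMBER_RANGE_TYPE_ODD = 2
--
-- STREET_NUMBER_RANGE_TYPE_EVEN = 3
--
-- def get_special_range(start_number, finish_number, type_of):
--     """
--     """
--     numbers = []
--     if type_of == STREET_NUMBER_RANGE_TYPE_ALL:
--         for i in range(start_number, finish_number):
--             numbers.append(i)
--     elif type_of == STREET_NUMBER_RANGE_TYPE_ODD: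
--         for i in range(start_number, finish_number):
--             if i % 2 != 0:
--                 numbers.append(i)
--     elif type_of == STREET_NUMBER_RANGE_TYPE_EVEN:
--         for i in range(start_number, finish_number):
--             if i % 2 == 0:
--                 numbers.append(i)
--     else:
--         raise Exception("Unsupported `type_of` parameter specified.")
--     return numbers
-- ===== SOURCE B (Python) =====
-- STREET_NUMBER_RANGE_TYPE_ALL = 1
--
-- STREET_NUMBER_RANGE_TYPE_ODD = 2
--
-- STREET_NUMBER_RANGE_TYPE_EVEN = 3
--
--
-- def get_special_range(start_number, finish_number, type_of):
--     if type_of == STREET_NUMBER_RANGE_TYPE_ALL: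
--         return list(range(start_number, finish_number))
--     if type_of == STREET_NUMBER_RANGE_TYPE_ODD:
--         s = start_number if start_number % 2 != 0 else start_number + 1
--         return list(range(s, finish_number, 2))
--     if type_of == STREET_NUMBER_RANGE_TYPE_EVEN:
--         s = start_number if start_number % 2 == 0 else start_number + 1
--         return list(range(s, finish_number, 2))
--     raise Exception("Unsupported `type_of` parameter specified.")
-- ===== Notes on version B (the rewrite author's own statement) =====
-- stated objective: idiomatic
-- what changed: Replaces the scan-and-filter loops with direct strided ranges: odd/even lists are produced by range(s, finish, 2) from the correctly-aligned start, so no element is visited and tested just to be discarded.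
import Mathlib
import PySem

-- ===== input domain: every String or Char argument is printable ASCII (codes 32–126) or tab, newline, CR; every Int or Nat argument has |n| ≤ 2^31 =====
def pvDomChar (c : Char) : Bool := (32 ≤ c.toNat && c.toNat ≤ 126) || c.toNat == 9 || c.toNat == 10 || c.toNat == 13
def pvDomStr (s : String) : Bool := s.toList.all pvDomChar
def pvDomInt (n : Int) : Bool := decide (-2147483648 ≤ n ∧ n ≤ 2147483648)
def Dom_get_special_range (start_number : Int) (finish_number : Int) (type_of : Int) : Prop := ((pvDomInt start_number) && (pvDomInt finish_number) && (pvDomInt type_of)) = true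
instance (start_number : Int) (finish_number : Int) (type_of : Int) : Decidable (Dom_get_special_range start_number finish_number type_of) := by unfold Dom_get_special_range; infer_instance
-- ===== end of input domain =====

-- B builds each result directly as a stride-2 (or stride-1) range from the correctly
-- aligned start, instead of scanning every integer and filtering by parity.

-- ===== PORT A =====
def get_special_range (start_number : Int) (finish_number : Int) (type_of : Int) : List Int :=
  if type_of == 1 then
    (PySem.List.pyRange start_number finish_number 1).foldl (fun acc i => acc ++ [i]) []
  else if type_of == 2 then
    (PySem.List.pyRange start_number finish_number 1).foldl
      (fun acc i => if PySem.Int.mod i 2 != 0 then acc ++ [i] else acc) []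
  else if type_of == 3 then
    (PySem.List.pyRange start_number finish_number 1).foldl
      (fun acc i => if PySem.Int.mod i 2 == 0 then acc ++ [i] else acc) []
  else []  -- Python raises Exception here; excluded by Pre_

-- ===== PORT B =====
def get_special_range_alt (start_number : Int) (finish_number : Int) (type_of : Int) : List Int :=
  if type_of == 1 then
    PySem.List.pyRange start_number finish_number 1
  else if type_of == 2 then
    let s := if PySem.Int.mod start_number 2 != 0 then start_number else start_number + 1
    PySem.List.pyRange s finish_number 2
  else if type_of == 3 then
    let s := if PySem.Int.mod start_number 2 == 0 then start_number else start_number + 1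
    PySem.List.pyRange s finish_number 2
  else []  -- Python raises Exception here; excluded by Pre_

-- ===== PRECONDITION & SPEC =====
-- Pre_ excludes exactly the inputs where A (and B) raise Exception: type_of not in {1,2,3}.
def Pre_get_special_range (start_number : Int) (finish_number : Int) (type_of : Int) : Prop :=
  type_of = 1 ∨ type_of = 2 ∨ type_of = 3
instance (start_number : Int) (finish_number : Int) (type_of : Int) : Decidable (Pre_get_special_range start_number finish_number type_of) := by unfold Pre_get_special_range; infer_instance

def pvWitness_get_special_range : Int × Int × Int := (3, 10, 2)

def Spec_get_special_range (start_number : Int) (finish_number : Int) (type_of : Int) (out : List Int) : Prop := out = get_special_range_alt start_number finish_number type_of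
instance (start_number : Int) (finish_number : Int) (type_of : Int) (out : List Int) : Decidable (Spec_get_special_range start_number finish_number type_of out) := by unfold Spec_get_special_range; infer_instance

-- ===== CLAIM (what is proved, stated in full; the proofs are below) =====
def Claim_equal_get_special_range : Prop := ∀ (start_number : Int) (finish_number : Int) (type_of : Int), Dom_get_special_range start_number finish_number type_of → Pre_get_special_range start_number finish_number type_of → Spec_get_special_range start_number finish_number type_of (get_special_range start_number finish_number type_of)

-- ===== LEMMAS AND PROOFS =====

lemma pairwise_lt_pyRange_two (s f : Int) :
    List.Pairwise (· < ·) (PySem.List.pyRange s f 2) := by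
  rw [PySem.List.pyRange_of_pos s f (by norm_num)]
  exact List.pairwise_lt_range.map _ (fun a b h => by omega)

-- the heart: filtering a unit-stride range by parity r is the stride-2 range from the aligned start
lemma filter_parity (p : Int → Bool) (r a f : Int)
    (hp : ∀ x, p x = true ↔ x % 2 = r) (hr : r = 0 ∨ r = 1) :
    (PySem.List.pyRange a f 1).filter p
      = PySem.List.pyRange (if a % 2 = r then a else a + 1) f 2 := by
  set s : Int := if a % 2 = r then a else a + 1 with hs
  have hsprop : s % 2 = r ∧ a ≤ s ∧ s ≤ a + 1 := by
    rw [hs]; split_ifs with h <;> omega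
  have hpw1 : List.Pairwise (· < ·) ((PySem.List.pyRange a f 1).filter p) :=
    (PySem.List.pairwise_lt_pyRange_one a f).filter p
  have hpw2 : List.Pairwise (· < ·) (PySem.List.pyRange s f 2) :=
    pairwise_lt_pyRange_two s f
  have hmem : ∀ x : Int,
      x ∈ (PySem.List.pyRange a f 1).filter p ↔ x ∈ PySem.List.pyRange s f 2 := by
    intro x
    rw [List.mem_filter, PySem.List.mem_pyRange_one,
        PySem.List.mem_pyRange_iff_of_pos (by norm_num : (0:Int) < 2), hp x]
    omega
  have hperm : ((PySem.List.pyRange a f 1).filter p).Perm (PySem.List.pyRange s f 2) :=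
    (List.perm_ext_iff_of_nodup
      (hpw1.imp fun h => ne_of_lt h) (hpw2.imp fun h => ne_of_lt h)).mpr hmem
  exact List.Perm.eq_of_pairwise (fun a b _ _ h1 h2 => le_antisymm h1 h2)
    (hpw1.imp fun h => le_of_lt h) (hpw2.imp fun h => le_of_lt h) hperm

-- ===== VERDICT (by name: the statement is the Claim_ definition above) =====
theorem get_special_range_spec : Claim_equal_get_special_range := by
  intro a f t _ hpre
  unfold Spec_get_special_range get_special_range get_special_range_alt
  have h2 : (0:Int) < 2 := by norm_num
  rcases hpre with h | h | h <;> subst h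
  · simp only [beq_self_eq_true, if_true]
    rw [PySem.List.foldl_append_singleton_eq_map (fun i : Int => i), List.nil_append,
      List.map_id_fun', id]
  · simp only [show ((2:Int) == 1) = false from rfl, show ((2:Int) == 2) = true from rfl,
      Bool.false_eq_true, if_false, if_true, PySem.Int.mod_eq_emod_of_pos h2]
    rw [show (fun (acc : List Int) (i : Int) => if i % 2 != 0 then acc ++ [i] else acc)
        = (fun acc i => if (fun x : Int => x % 2 != 0) i then acc ++ [i] else acc) from rfl,
      PySem.List.foldl_append_if_eq_filter, List.nil_append,
      filter_parity (fun x : Int => x % 2 != 0) 1 a f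
        (fun x => by simp only [bne_iff_ne, ne_eq]; omega) (Or.inr rfl)]
    by_cases h : a % 2 = 1
    · rw [if_pos h, if_pos (by simp only [bne_iff_ne, ne_eq]; omega)]
    · rw [if_neg h, if_neg (by simp only [bne_iff_ne, ne_eq]; omega)]
  · simp only [show ((3:Int) == 1) = false from rfl, show ((3:Int) == 2) = false from rfl,
      show ((3:Int) == 3) = true from rfl, Bool.false_eq_true, if_false, if_true,
      PySem.Int.mod_eq_emod_of_pos h2]
    rw [show (fun (acc : List Int) (i : Int) => if i % 2 == 0 then acc ++ [i] else acc)
        = (fun acc i => if (fun x : Int => x % 2 == 0) i then acc ++ [i] else acc) from rfl,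
      PySem.List.foldl_append_if_eq_filter, List.nil_append,
      filter_parity (fun x : Int => x % 2 == 0) 0 a f
        (fun x => beq_iff_eq) (Or.inl rfl)]
    by_cases h : a % 2 = 0
    · rw [if_pos h, if_pos (beq_iff_eq.mpr h)]
    · rw [if_neg h, if_neg (by simpa using h)]
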